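-- pv_equiv track=rewrite | github.com/KFerrei/Consideration-of-3D-Context-in-Cross-sectional-Vessel-Segmentation | models/unet_2_5d.py | _create_encoder_blocks
-- ===== SOURCE A (Python) =====
-- def _create_encoder_blocks(filter_1, depth):
--     """
--     Creates the blocks for the encoder by defining the in_channels, out_channels,
--     and stride for each convolutional layer.
--
--     Args:
--         filter_1 (int): Initial filter size.
--         depth (int): Depth of the model.
--
--     Returns:
--         List of tuples representing the configuration for each block.
--     """
--     params_block = []
--     in_channels, out_channels = 1, filter_1
--     for _ in range(depth - 1):
--         params_block.append((in_channels, out_channels, 2))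
--         in_channels, out_channels = out_channels, 2 * out_channels
--     params_block.append((in_channels, out_channels, 1))
--     return params_block
-- ===== SOURCE B (Python) =====
-- def _create_encoder_blocks(filter_1, depth):
--     """Closed-form re-implementation: each block's channels are powers of two
--     computed directly from the block index, no state threaded through the loop."""
--     blocks = [((1 if i == 0 else filter_1 << (i - 1)), filter_1 << i, 2)
--               for i in range(depth - 1)]
--     if depth <= 1:
--         blocks.append((1, filter_1, 1))
--     else:
--         blocks.append((filter_1 << (depth - 2), filter_1 << (depth - 1), 1))
--     return blocks
-- ===== Notes on version B (the rewrite author's own statement) =====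
-- stated objective: alternative
-- what changed: Replaces the stateful loop threading (in_channels, out_channels) through iterations by a closed-form comprehension computing each block's channels directly from the block index as filter_1 shifted by powers of two, with the final block computed separately.
import Mathlib
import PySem

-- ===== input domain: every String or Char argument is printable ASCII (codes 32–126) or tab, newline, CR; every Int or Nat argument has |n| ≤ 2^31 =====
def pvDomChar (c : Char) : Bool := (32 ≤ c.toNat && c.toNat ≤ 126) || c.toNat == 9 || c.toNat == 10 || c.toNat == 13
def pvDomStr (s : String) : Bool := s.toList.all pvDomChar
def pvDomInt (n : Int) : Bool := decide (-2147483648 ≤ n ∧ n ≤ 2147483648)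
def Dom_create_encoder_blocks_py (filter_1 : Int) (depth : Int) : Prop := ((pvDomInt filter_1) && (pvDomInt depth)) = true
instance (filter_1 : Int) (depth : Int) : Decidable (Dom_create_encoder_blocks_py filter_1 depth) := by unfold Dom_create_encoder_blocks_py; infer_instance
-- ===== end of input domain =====

-- B replaces A's stateful channel-threading loop by closed-form per-index computation
-- (channels as filter_1 shifted by powers of two), with the final block built separately (objective: alternative).

-- ===== PORT A =====
def create_encoder_blocks_py (filter_1 : Int) (depth : Int) : List (Int × Int × Int) :=
  let st := (PySem.List.pyRange 0 (depth - 1) 1).foldl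
    (fun (s : List (Int × Int × Int) × Int × Int) _ =>
      (s.1 ++ [(s.2.1, s.2.2, 2)], s.2.2, 2 * s.2.2))
    ([], 1, filter_1)
  st.1 ++ [(st.2.1, st.2.2, 1)]

-- ===== PORT B =====
def create_encoder_blocks_py_alt (filter_1 : Int) (depth : Int) : List (Int × Int × Int) :=
  ((PySem.List.pyRange 0 (depth - 1) 1).map
    (fun (i : Int) => ((if i == 0 then (1 : Int) else filter_1 <<< (i - 1).toNat),
                       filter_1 <<< i.toNat, 2)))
  ++ [if depth ≤ 1 then ((1 : Int), filter_1, 1)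
      else (filter_1 <<< (depth - 2).toNat, filter_1 <<< (depth - 1).toNat, 1)]

-- ===== PRECONDITION & SPEC =====
def Spec_create_encoder_blocks_py (filter_1 : Int) (depth : Int) (out : List (Int × Int × Int)) : Prop := out = create_encoder_blocks_py_alt filter_1 depth
instance (filter_1 : Int) (depth : Int) (out : List (Int × Int × Int)) : Decidable (Spec_create_encoder_blocks_py filter_1 depth out) := by unfold Spec_create_encoder_blocks_py; infer_instance

-- ===== CLAIM (what is proved, stated in full; the proofs are below) =====
def Claim_equal_create_encoder_blocks_py : Prop := ∀ (filter_1 : Int) (depth : Int), Dom_create_encoder_blocks_py filter_1 depth → Spec_create_encoder_blocks_py filter_1 depth (create_encoder_blocks_py filter_1 depth)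

-- ===== LEMMAS AND PROOFS =====

-- A's loop ignores the loop variable; its result after consuming any list is a
-- closed form in the list's length (blocks so far, in_channels, out_channels).
lemma loopA_closed (f : Int) (l : List Int) :
    l.foldl
      (fun (s : List (Int × Int × Int) × Int × Int) _ =>
        (s.1 ++ [(s.2.1, s.2.2, 2)], s.2.2, 2 * s.2.2))
      ([], 1, f)
    = ((List.range l.length).map
         (fun k => ((if k = 0 then (1 : Int) else f * 2 ^ (k - 1)), f * 2 ^ k, 2)),
       (if l.length = 0 then (1 : Int) else f * 2 ^ (l.length - 1)), f * 2 ^ l.length) := by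
  induction l using List.reverseRecOn with
  | nil => simp
  | append_singleton l x ih =>
    rw [List.foldl_append, ih, List.foldl_cons, List.foldl_nil]
    refine Prod.ext ?_ (Prod.ext ?_ ?_)
    · simp [List.range_succ]
    · simp
    · simp [pow_succ]; ring

lemma ports_eq (f d : Int) :
    create_encoder_blocks_py f d = create_encoder_blocks_py_alt f d := by
  have hlen : (PySem.List.pyRange 0 (d - 1) 1).length = (d - 1).toNat := by
    simp [PySem.List.length_pyRange_one]
  unfold create_encoder_blocks_py create_encoder_blocks_py_alt
  dsimp only
  rw [loopA_closed, hlen]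
  dsimp only
  congr 1
  · rw [PySem.List.pyRange_one, List.map_map, Int.sub_zero]
    refine (List.map_congr_left ?_).symm
    intro k hk
    simp only [Function.comp, zero_add, Int.shiftLeft_eq]
    by_cases hk0 : k = 0
    · simp [hk0]
    · have hz : ((k : Int)) ≠ 0 := by exact_mod_cast hk0
      have h1 : ((k : Int) - 1).toNat = k - 1 := by omega
      simp only [beq_iff_eq, hz, if_false, hk0, h1, Int.toNat_natCast]
  · by_cases hd : d ≤ 1
    · have hn0 : (d - 1).toNat = 0 := by omega
      simp [hn0, hd]
    · have hn0 : (d - 1).toNat ≠ 0 := by omega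
      have h2 : (d - 2).toNat = (d - 1).toNat - 1 := by omega
      rw [if_neg hn0, if_neg hd, Int.shiftLeft_eq, Int.shiftLeft_eq, h2]

-- ===== VERDICT (by name: the statement is the Claim_ definition above) =====
theorem create_encoder_blocks_py_spec : Claim_equal_create_encoder_blocks_py := by
  intro f d _
  unfold Spec_create_encoder_blocks_py
  exact ports_eq f d
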